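-- pv_equiv track=rewrite | github.com/timvieira/transduction | transduction/viz.py | _char_ranges
-- ===== SOURCE A (Python) =====
-- def _char_ranges(chars):
--     """Yield ``(lo, hi)`` pairs for runs of consecutive codepoints in *chars*."""
--     cps = sorted(ord(c) for c in chars)
--     if not cps:
--         return
--     start = prev = cps[0]
--     for k in cps[1:]:
--         if k != prev + 1:
--             yield chr(start), chr(prev)
--             start = k
--         prev = k
--     yield chr(start), chr(prev)
-- ===== SOURCE B (Python) =====
-- from itertools import groupby
--
-- def _char_ranges(chars):
--     """Yield ``(lo, hi)`` pairs for runs of consecutive codepoints in *chars*."""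
--     cps = sorted(ord(c) for c in chars)
--     for _, run in groupby(enumerate(cps), key=lambda iv: iv[1] - iv[0]):
--         run = list(run)
--         yield chr(run[0][1]), chr(run[-1][1])
-- ===== Notes on version B (the rewrite author's own statement) =====
-- stated objective: idiomatic
-- what changed: Replaces the explicit start/prev accumulator loop with itertools.groupby over enumerate(cps) keyed by value-minus-index, so maximal consecutive runs are carved out by a group-by decomposition and each pair is the first/last element of a group.
import Mathlib
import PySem

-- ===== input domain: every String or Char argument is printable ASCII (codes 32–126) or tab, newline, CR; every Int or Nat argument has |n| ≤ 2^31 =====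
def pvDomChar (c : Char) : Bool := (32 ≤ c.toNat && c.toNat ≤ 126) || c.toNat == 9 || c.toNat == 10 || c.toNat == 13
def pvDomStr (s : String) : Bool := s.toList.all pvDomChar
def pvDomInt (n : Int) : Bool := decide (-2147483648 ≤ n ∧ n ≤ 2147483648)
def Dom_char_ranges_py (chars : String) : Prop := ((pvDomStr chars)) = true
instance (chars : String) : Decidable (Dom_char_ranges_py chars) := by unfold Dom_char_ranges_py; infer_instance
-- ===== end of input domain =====

-- B replaces A's start/prev accumulator loop with itertools.groupby over enumerate(cps)
-- keyed by value-minus-index (a group-by decomposition of the sorted codepoints into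
-- maximal consecutive runs); objective: idiomatic, same cost.

-- ===== PORT A =====
-- chr(n) as a one-character string (codepoints here are small and nonnegative on Dom)
def pvChr (n : Int) : String := String.ofList [Char.ofNat n.toNat]

-- the explicit for-loop of A over cps[1:], carrying (start, prev)
def pvLoopA : Int → Int → List Int → List (String × String)
  | start, prev, [] => [(pvChr start, pvChr prev)]
  | start, prev, k :: t =>
    if k ≠ prev + 1 then (pvChr start, pvChr prev) :: pvLoopA k k t
    else pvLoopA start k t

def char_ranges_py (chars : String) : List (String × String) :=
  let cps := PySem.List.sorted (chars.toList.map (fun c => (c.toNat : Int))) (fun x => x) false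
  match cps with
  | [] => []
  | c :: rest => pvLoopA c c rest

-- ===== PORT B =====
-- itertools.groupby with a key function: maximal chunks of equal key
def pvGroupBy {α β : Type} [BEq β] (key : α → β) : List α → List (List α)
  | [] => []
  | x :: xs =>
    (x :: xs.takeWhile (fun y => key y == key x)) ::
      pvGroupBy key (xs.dropWhile (fun y => key y == key x))
termination_by l => l.length
decreasing_by
  simp only [List.length_cons]
  exact Nat.lt_succ_of_le (List.length_dropWhile_le _ _)

-- yield chr(run[0][1]), chr(run[-1][1]) for a (nonempty) group
def pvRunPair : List (Int × Int) → Option (String × String)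
  | [] => none
  | x :: rest => some (pvChr x.2, pvChr ((x :: rest).getLast (List.cons_ne_nil x rest)).2)

-- the whole groupby-and-yield pipeline over the enumerated list
def pvB (l : List (Int × Int)) : List (String × String) :=
  (pvGroupBy (fun iv : Int × Int => iv.2 - iv.1) l).filterMap pvRunPair

def char_ranges_py_alt (chars : String) : List (String × String) :=
  let cps := PySem.List.sorted (chars.toList.map (fun c => (c.toNat : Int))) (fun x => x) false
  pvB (PySem.List.enumerate cps)

-- ===== PRECONDITION & SPEC =====
def Spec_char_ranges_py (chars : String) (out : List (String × String)) : Prop := out = char_ranges_py_alt chars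
instance (chars : String) (out : List (String × String)) : Decidable (Spec_char_ranges_py chars out) := by unfold Spec_char_ranges_py; infer_instance

-- ===== CLAIM (what is proved, stated in full; the proofs are below) =====
def Claim_equal_char_ranges_py : Prop := ∀ (chars : String), Dom_char_ranges_py chars → Spec_char_ranges_py chars (char_ranges_py chars)

-- ===== LEMMAS AND PROOFS =====

-- unfolding lemma for the well-founded pvGroupBy on a cons cell
theorem pvGroupBy_cons {α β : Type} [BEq β] (key : α → β) (x : α) (xs : List α) :
    pvGroupBy key (x :: xs) =
      (x :: xs.takeWhile (fun y => key y == key x)) ::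
        pvGroupBy key (xs.dropWhile (fun y => key y == key x)) := by
  rw [pvGroupBy.eq_def]

-- the last element's second component of a nonempty list, via getLast? with default
theorem pv_last_snd (x : Int × Int) (l : List (Int × Int)) (h : x :: l ≠ []) :
    ((x :: l).getLast h).2 = ((l.getLast?.map Prod.snd).getD x.2) := by
  induction l generalizing x with
  | nil => simp [List.getLast]
  | cons y t ih =>
    rw [List.getLast_cons (by simp), ih y (by simp)]
    cases ht : t.getLast? <;> simp [List.getLast?_cons, ht]

-- prepending an element shifts the default of the "last second component" extraction
theorem pv_cons_getLast_snd (x : Int × Int) (l : List (Int × Int)) (d : Int) :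
    (Option.map Prod.snd (x :: l).getLast?).getD d = (Option.map Prod.snd l.getLast?).getD x.2 := by
  rw [List.getLast?_cons]
  cases l.getLast? <;> rfl

-- core invariant: A's loop from state (start, prev) equals the first group's pair
-- followed by B's pipeline on the rest, where the group key base is b = prev - (i-1)
theorem pv_main (t : List Int) : ∀ (i start prev b : Int), prev = b + i - 1 →
    pvLoopA start prev t =
      (pvChr start,
        pvChr ((((PySem.List.enumerate t i).takeWhile (fun y => y.2 - y.1 == b)).getLast?.map Prod.snd).getD prev))
      :: pvB ((PySem.List.enumerate t i).dropWhile (fun y => y.2 - y.1 == b)) := by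
  induction t with
  | nil => intro i start prev b hb; simp [pvLoopA, PySem.List.enumerate, pvB, pvGroupBy]
  | cons k t ih =>
    intro i start prev b hb
    rw [PySem.List.enumerate_cons]
    by_cases hk : k = prev + 1
    · subst hk
      have hc : ((prev + 1 : Int) - i == b) = true := by simp; omega
      rw [List.takeWhile_cons, List.dropWhile_cons]
      simp only [hc, if_true]
      rw [pvLoopA, if_neg (by simp)]
      rw [ih (i + 1) start (prev + 1) b (by omega)]
      rw [pv_cons_getLast_snd]
    · have hc : ((k : Int) - i == b) = false := by simp; omega
      rw [List.takeWhile_cons, List.dropWhile_cons]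
      simp only [hc, Bool.false_eq_true, if_false]
      rw [pvLoopA, if_pos hk]
      congr 1
      rw [pvB, pvGroupBy_cons]
      simp only [List.filterMap_cons, pvRunPair]
      rw [ih (i + 1) k k (k - i) (by omega)]
      rw [pv_last_snd]
      rfl

-- ===== VERDICT (by name: the statement is the Claim_ definition above) =====
theorem char_ranges_py_spec : Claim_equal_char_ranges_py := by
  intro chars _
  unfold Spec_char_ranges_py char_ranges_py char_ranges_py_alt
  cases h : PySem.List.sorted (chars.toList.map (fun c => (c.toNat : Int))) (fun x => x) false with
  | nil => simp [pvB, pvGroupBy, PySem.List.enumerate]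
  | cons c rest =>
    simp only []
    rw [PySem.List.enumerate_cons, pvB, pvGroupBy_cons]
    simp only [List.filterMap_cons, pvRunPair]
    rw [pv_main rest (0 + 1) c c (c - 0) (by omega)]
    rw [pv_last_snd]
    rfl
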